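-- pv_equiv track=rewrite | github.com/progsi/YTUnCoverLLM | preprocessing/2_make_biotag_dataset.py | __char_index_to_word_index
-- ===== SOURCE A (Python) =====
-- def __char_index_to_word_index(s: str, idx: int) -> int:
--     """Helper to transform char index in string to word index (after split by space).
--     Args:
--         s (str): word index
--         idx (int): char index
--     Returns:
--         int: word level index
--     """
--     cur_idx = 0
--     for w_idx, word in enumerate(s.split()):
--         # consider length and space
--         cur_len = len(word) + 1
--         if cur_idx <= idx < cur_idx + cur_len:
--             return w_idx
--         cur_idx += cur_len
--     return -1
-- ===== SOURCE B (Python) =====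
-- def __char_index_to_word_index(s: str, idx: int) -> int:
--     """Map a char index to a word index (after split) via cumulative
--     end offsets and a binary search instead of a linear interval scan."""
--     ends = []
--     total = 0
--     for w in s.split():
--         total += len(w) + 1
--         ends.append(total)
--     if idx < 0 or not ends or idx >= ends[-1]:
--         return -1
--     lo, hi = 0, len(ends)
--     while lo < hi:
--         mid = (lo + hi) // 2
--         if ends[mid] <= idx:
--             lo = mid + 1
--         else:
--             hi = mid
--     return lo
-- ===== Notes on version B (the rewrite author's own statement) =====
-- stated objective: alternative
-- what changed: Replaces A's single linear scan testing each word's [start,end) interval with building a list of cumulative word end-offsets and locating idx by a hand-written binary search after explicit range guards.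
import Mathlib
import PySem

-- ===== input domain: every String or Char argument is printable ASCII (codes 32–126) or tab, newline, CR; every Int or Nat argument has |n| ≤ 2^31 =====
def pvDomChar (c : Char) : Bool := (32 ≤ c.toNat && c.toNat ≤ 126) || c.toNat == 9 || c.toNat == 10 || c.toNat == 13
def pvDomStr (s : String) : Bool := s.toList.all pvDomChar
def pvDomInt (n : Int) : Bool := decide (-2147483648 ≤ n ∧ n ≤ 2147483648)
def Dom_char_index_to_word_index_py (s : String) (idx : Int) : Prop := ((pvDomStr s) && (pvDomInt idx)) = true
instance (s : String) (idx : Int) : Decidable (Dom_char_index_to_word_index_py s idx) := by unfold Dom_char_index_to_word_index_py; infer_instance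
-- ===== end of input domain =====

-- B replaces A's linear per-word interval scan by cumulative end-offsets plus a binary search; same results.

-- ===== PORT A =====
-- the for-loop over enumerate(s.split()) with state (w_idx, cur_idx)
def pvALoop (idx : Int) : List String → Int → Int → Int
  | [], _, _ => -1
  | w :: ws, wIdx, curIdx =>
    let curLen := PySem.Str.len w + 1
    if curIdx ≤ idx ∧ idx < curIdx + curLen then wIdx
    else pvALoop idx ws (wIdx + 1) (curIdx + curLen)

def char_index_to_word_index_py (s : String) (idx : Int) : Int :=
  pvALoop idx (PySem.Str.split₀ s) 0 0

-- ===== PORT B =====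
-- the first loop of Source B, building ends with state (ends, total)
def pvBuildEnds : List String → List Int → Int → List Int
  | [], ends, _ => ends
  | w :: ws, ends, total =>
    let t := total + (PySem.Str.len w + 1)
    pvBuildEnds ws (ends ++ [t]) t

-- the while-loop of Source B; ends[mid] is always in range here, so pyGetD is exact
def pvBsearch (ends : List Int) (idx : Int) (lo hi : Nat) : Int :=
  if h : lo < hi then
    let mid := (lo + hi) / 2
    if PySem.List.pyGetD ends (mid : Int) 0 ≤ idx then pvBsearch ends idx (mid + 1) hi
    else pvBsearch ends idx lo mid
  else (lo : Int)
termination_by hi - lo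
decreasing_by all_goals omega

def char_index_to_word_index_py_alt (s : String) (idx : Int) : Int :=
  let ends := pvBuildEnds (PySem.Str.split₀ s) [] 0
  if idx < 0 ∨ ends = [] ∨ PySem.List.pyGetD ends (-1) 0 ≤ idx then -1
  else pvBsearch ends idx 0 ends.length

-- ===== PRECONDITION & SPEC =====
def Spec_char_index_to_word_index_py (s : String) (idx : Int) (out : Int) : Prop := out = char_index_to_word_index_py_alt s idx
instance (s : String) (idx : Int) (out : Int) : Decidable (Spec_char_index_to_word_index_py s idx out) := by unfold Spec_char_index_to_word_index_py; infer_instance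

-- ===== CLAIM (what is proved, stated in full; the proofs are below) =====
def Claim_equal_char_index_to_word_index_py : Prop := ∀ (s : String) (idx : Int), Dom_char_index_to_word_index_py s idx → Spec_char_index_to_word_index_py s idx (char_index_to_word_index_py s idx)

-- ===== LEMMAS AND PROOFS =====

-- cons-shaped version of the ends list, convenient for induction
def pvEndsFrom : List String → Int → List Int
  | [], _ => []
  | w :: ws, t => (t + (PySem.Str.len w + 1)) :: pvEndsFrom ws (t + (PySem.Str.len w + 1))

-- linear first-index-with-end-greater-than-idx, the shape A's loop reduces to
def pvLinFirst (idx : Int) : List Int → Int → Int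
  | [], _ => -1
  | e :: es, j => if idx < e then j else pvLinFirst idx es (j + 1)

theorem pvStrLen_nonneg (w : String) : 0 ≤ PySem.Str.len w := by
  simp [PySem.Str.len_eq]

theorem pvBuild_eq (ws : List String) : ∀ acc t, pvBuildEnds ws acc t = acc ++ pvEndsFrom ws t := by
  induction ws with
  | nil => intro acc t; simp [pvBuildEnds, pvEndsFrom]
  | cons w ws ih => intro acc t; simp [pvBuildEnds, pvEndsFrom, ih]

theorem pvEndsFrom_gt (ws : List String) : ∀ t e, e ∈ pvEndsFrom ws t → t < e := by
  induction ws with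
  | nil => intro t e h; simp [pvEndsFrom] at h
  | cons w ws ih =>
    intro t e h
    simp only [pvEndsFrom, List.mem_cons] at h
    have hw := pvStrLen_nonneg w
    rcases h with h | h
    · omega
    · have := ih _ _ h; omega

theorem pvEndsFrom_sorted (ws : List String) : ∀ t, (pvEndsFrom ws t).Pairwise (· < ·) := by
  induction ws with
  | nil => intro t; simp [pvEndsFrom]
  | cons w ws ih =>
    intro t
    simp only [pvEndsFrom, List.pairwise_cons]
    exact ⟨fun e he => pvEndsFrom_gt ws _ e he, ih _⟩

theorem pvEndsFrom_le_last (ws : List String) : ∀ t e (h : pvEndsFrom ws t ≠ []),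
    e ∈ pvEndsFrom ws t → e ≤ (pvEndsFrom ws t).getLast h := by
  intro t e h he
  have hs := pvEndsFrom_sorted ws t
  rcases List.mem_iff_getElem.mp he with ⟨i, hi, hie⟩
  have hlast : (pvEndsFrom ws t).getLast h = (pvEndsFrom ws t)[(pvEndsFrom ws t).length - 1] :=
    List.getLast_eq_getElem h
  rcases Nat.lt_or_ge i ((pvEndsFrom ws t).length - 1) with hlt | hge
  · have h2 := (List.pairwise_iff_getElem.mp hs) i ((pvEndsFrom ws t).length - 1) hi (by omega) hlt
    rw [hlast, ← hie]
    exact le_of_lt h2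
  · have hieq : i = (pvEndsFrom ws t).length - 1 := by omega
    rw [hlast, ← hie]
    simp [hieq]

-- strict monotonicity at the level of getD
theorem pvEndsFrom_mono (ws : List String) (t : Int) {i j : Nat} (hij : i < j)
    (hj : j < (pvEndsFrom ws t).length) :
    (pvEndsFrom ws t).getD i 0 < (pvEndsFrom ws t).getD j 0 := by
  have hs := pvEndsFrom_sorted ws t
  have hi : i < (pvEndsFrom ws t).length := by omega
  rw [List.getD_eq_getElem _ _ hi, List.getD_eq_getElem _ _ hj]
  exact (List.pairwise_iff_getElem.mp hs) i j hi hj hij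

theorem pvALoop_neg (idx : Int) (ws : List String) : ∀ wIdx curIdx, idx < curIdx →
    pvALoop idx ws wIdx curIdx = -1 := by
  induction ws with
  | nil => intro _ _ _; simp [pvALoop]
  | cons w ws ih =>
    intro wIdx curIdx h
    have hw := pvStrLen_nonneg w
    simp only [pvALoop]
    rw [if_neg (by omega)]
    exact ih _ _ (by omega)

theorem pvALoop_eq_lin (idx : Int) (ws : List String) : ∀ wIdx curIdx, curIdx ≤ idx →
    pvALoop idx ws wIdx curIdx = pvLinFirst idx (pvEndsFrom ws curIdx) wIdx := by
  induction ws with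
  | nil => intro _ _ _; simp [pvALoop, pvEndsFrom, pvLinFirst]
  | cons w ws ih =>
    intro wIdx curIdx h
    simp only [pvALoop, pvEndsFrom, pvLinFirst]
    by_cases hc : idx < curIdx + (PySem.Str.len w + 1)
    · rw [if_pos ⟨h, hc⟩, if_pos hc]
    · rw [if_neg (by tauto), if_neg hc]
      exact ih _ _ (by omega)

theorem pvLinFirst_all_le (idx : Int) (es : List Int) : ∀ j, (∀ e ∈ es, e ≤ idx) →
    pvLinFirst idx es j = -1 := by
  induction es with
  | nil => intro _ _; simp [pvLinFirst]
  | cons e es ih =>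
    intro j h
    have he : e ≤ idx := h e (by simp)
    simp only [pvLinFirst]
    rw [if_neg (by omega)]
    exact ih _ (fun x hx => h x (by simp [hx]))

theorem pvLinFirst_spec (idx : Int) (es : List Int) : ∀ j, (∃ e ∈ es, idx < e) →
    ∃ k : Nat, k < es.length ∧ pvLinFirst idx es j = j + (k : Int) ∧
      idx < es.getD k 0 ∧ (∀ m < k, es.getD m 0 ≤ idx) := by
  induction es with
  | nil => intro _ h; simp at h
  | cons e es ih =>
    intro j h
    by_cases hc : idx < e
    · exact ⟨0, by simp, by simp [pvLinFirst, hc], by simpa using hc, by omega⟩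
    · have h' : ∃ x ∈ es, idx < x := by
        rcases h with ⟨x, hx, hxi⟩
        rcases List.mem_cons.mp hx with rfl | hx
        · omega
        · exact ⟨x, hx, hxi⟩
      rcases ih (j + 1) h' with ⟨k, hk, heq, hgt, hle⟩
      refine ⟨k + 1, by simpa using hk, ?_, by simpa using hgt, ?_⟩
      · simp only [pvLinFirst]; rw [if_neg hc, heq]; push_cast; ring
      · intro m hm
        cases m with
        | zero => simpa using (by omega : e ≤ idx)
        | succ m => simpa using hle m (by omega)

theorem pvBsearch_spec (ends : List Int) (idx : Int)
    (mono : ∀ i j : Nat, i < j → j < ends.length → ends.getD i 0 < ends.getD j 0) :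
    ∀ d lo hi, hi - lo = d → lo ≤ hi → hi ≤ ends.length →
    (∀ m < lo, ends.getD m 0 ≤ idx) → (∀ m, hi ≤ m → m < ends.length → idx < ends.getD m 0) →
    ∃ r : Nat, pvBsearch ends idx lo hi = (r : Int) ∧ r ≤ ends.length ∧
      (∀ m < r, ends.getD m 0 ≤ idx) ∧ (∀ m, r ≤ m → m < ends.length → idx < ends.getD m 0) := by
  intro d
  induction d using Nat.strong_induction_on with
  | _ d ih =>
    intro lo hi hd hle hlen hlo hhi
    by_cases h : lo < hi
    · rw [pvBsearch, dif_pos h]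
      have hmid : (lo + hi) / 2 < ends.length := by omega
      have hget : PySem.List.pyGetD ends (((lo + hi) / 2 : Nat) : Int) 0 = ends.getD ((lo + hi) / 2) 0 := by
        rw [PySem.List.pyGetD_natCast]
      by_cases hc : PySem.List.pyGetD ends (((lo + hi) / 2 : Nat) : Int) 0 ≤ idx
      · rw [if_pos hc]
        rw [hget] at hc
        refine ih (hi - ((lo + hi) / 2 + 1)) (by omega) _ _ rfl (by omega) hlen ?_ hhi
        intro m hm
        rcases Nat.lt_or_ge m ((lo + hi) / 2) with hm' | hm'
        · exact le_of_lt (lt_of_lt_of_le (mono m _ hm' hmid) hc)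
        · have : m = (lo + hi) / 2 := by omega
          rw [this]; exact hc
      · rw [if_neg hc]
        rw [hget] at hc
        refine ih ((lo + hi) / 2 - lo) (by omega) _ _ rfl (by omega) (by omega) hlo ?_
        intro m hm hmlen
        rcases Nat.lt_or_ge m ((lo + hi) / 2 + 1) with hm' | hm'
        · have : m = (lo + hi) / 2 := by omega
          rw [this]; omega
        · exact lt_trans (by omega) (mono ((lo + hi) / 2) m (by omega) hmlen)
    · rw [pvBsearch, dif_neg h]
      have : lo = hi := by omega
      exact ⟨lo, rfl, by omega, hlo, fun m hm hml => hhi m (by omega) hml⟩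

-- the boundary point is unique
theorem pvBoundary_unique (es : List Int) (idx : Int) (r1 r2 : Nat)
    (h1 : r1 ≤ es.length) (h2 : r2 ≤ es.length)
    (a1 : ∀ m < r1, es.getD m 0 ≤ idx) (b1 : ∀ m, r1 ≤ m → m < es.length → idx < es.getD m 0)
    (a2 : ∀ m < r2, es.getD m 0 ≤ idx) (b2 : ∀ m, r2 ≤ m → m < es.length → idx < es.getD m 0) :
    r1 = r2 := by
  rcases Nat.lt_trichotomy r1 r2 with h | h | h
  · have hgt := b1 r1 (le_refl _) (by omega)
    have hle := a2 r1 h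
    omega
  · exact h
  · have hgt := b2 r2 (le_refl _) (by omega)
    have hle := a1 r2 h
    omega

-- ===== VERDICT (by name: the statement is the Claim_ definition above) =====
theorem char_index_to_word_index_py_spec : Claim_equal_char_index_to_word_index_py := by
  intro s idx _
  unfold Spec_char_index_to_word_index_py
  unfold char_index_to_word_index_py char_index_to_word_index_py_alt
  rw [pvBuild_eq]
  simp only [List.nil_append]
  set ws := PySem.Str.split₀ s with hws
  set es := pvEndsFrom ws 0 with hes
  by_cases hneg : idx < 0
  · rw [if_pos (Or.inl hneg)]
    exact pvALoop_neg idx ws 0 0 (by omega)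
  · rw [not_lt] at hneg
    have hA : pvALoop idx ws 0 0 = pvLinFirst idx es 0 := pvALoop_eq_lin idx ws 0 0 hneg
    by_cases hnil : es = []
    · rw [if_pos (Or.inr (Or.inl hnil))]
      rw [hA, hnil]; simp [pvLinFirst]
    · have hlast : PySem.List.pyGetD es (-1) 0 = es.getLast hnil :=
        PySem.List.pyGetD_neg_one es 0 hnil
      by_cases hge : PySem.List.pyGetD es (-1) 0 ≤ idx
      · rw [if_pos (Or.inr (Or.inr hge))]
        rw [hA]
        apply pvLinFirst_all_le
        intro e he
        have := pvEndsFrom_le_last ws 0 e (hes ▸ hnil) (hes ▸ he)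
        rw [hlast] at hge
        calc e ≤ es.getLast hnil := this
          _ ≤ idx := hge
      · rw [if_neg (by
          intro hcon
          rcases hcon with hc | hc | hc
          · omega
          · exact hnil hc
          · exact hge hc)]
        rw [not_le] at hge
        rw [hlast] at hge
        have hmono : ∀ i j : Nat, i < j → j < es.length → es.getD i 0 < es.getD j 0 :=
          fun i j hij hj => pvEndsFrom_mono ws 0 hij (hes ▸ hj)
        -- A side: linear search finds the unique boundary k
        have hex : ∃ e ∈ es, idx < e := ⟨es.getLast hnil, List.getLast_mem hnil, hge⟩
        rcases pvLinFirst_spec idx es 0 hex with ⟨k, hk, heq, hgt, hle⟩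
        have hbk : ∀ m, k ≤ m → m < es.length → idx < es.getD m 0 := by
          intro m hm hml
          rcases Nat.eq_or_lt_of_le hm with rfl | hm'
          · exact hgt
          · exact lt_trans hgt (hmono k m hm' hml)
        -- B side: binary search finds a boundary r
        rcases pvBsearch_spec es idx hmono (es.length - 0) 0 es.length rfl (by omega) (le_refl _)
          (by omega) (by omega) with ⟨r, hreq, hrlen, hra, hrb⟩
        have : r = k := pvBoundary_unique es idx r k hrlen (by omega) hra hrb hle hbk
        rw [hA, heq, hreq, this]; simp
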